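-- pv_equiv track=rewrite | github.com/Alef-Keuffer/LA2 | Codeboard/Treino2/cidade.py | build
-- ===== SOURCE A (Python) =====
-- def undirected(t):
--     return t + [(r[1], r[0], r[2]) for r in t]
--
-- def build(edges, adj=None, opt1='undi'):
--     # Assumes edges :: [(v,v,weight::int)]
--     if opt1 == 'dir':
--         edges1 = [(r[0], r[1], min(edges, key=lambda x: x[2] if x[0] == r[0] and x[1] == r[1] else float('inf'))[2])
--                   for r in edges]
--     else:
--         dual = undirected(edges)
--         edges1 = [(r[0], r[1], min(dual, key=lambda x: x[2] if x[0] == r[0] and x[1] == r[1] else float('inf'))[2])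
--                   for r in dual]
--     if adj is None:
--         adj = {}
--     for o, d, p in edges1:
--         if o not in adj:
--             adj[o] = {}
--         adj[o][d] = p
--     return adj
-- ===== SOURCE B (Python) =====
-- def build(edges, adj=None, opt1='undi'):
--     # Assumes edges :: [(v,v,weight::int)]
--     # One pass over the (possibly doubled) edge list builds a (o,d)->min-weight
--     # dict, then one more pass fills the adjacency dict: O(n) instead of O(n^2).
--     if opt1 == 'dir':
--         es = edges
--     else:
--         es = edges + [(d, o, p) for o, d, p in edges]
--     best = {}
--     for o, d, p in es:
--         q = best.get((o, d))
--         if q is None or p < q: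
--             best[(o, d)] = p
--     if adj is None:
--         adj = {}
--     for o, d, p in es:
--         if o not in adj:
--             adj[o] = {}
--         adj[o][d] = best[(o, d)]
--     return adj
-- ===== Notes on version B (the rewrite author's own statement) =====
-- stated objective: faster
-- what changed: A rescans the whole (doubled) edge list with min(..., key=...) for every edge (quadratic); B makes one pass building a dict (o,d)->min weight and then fills the adjacency with O(1) lookups.
import Mathlib
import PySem

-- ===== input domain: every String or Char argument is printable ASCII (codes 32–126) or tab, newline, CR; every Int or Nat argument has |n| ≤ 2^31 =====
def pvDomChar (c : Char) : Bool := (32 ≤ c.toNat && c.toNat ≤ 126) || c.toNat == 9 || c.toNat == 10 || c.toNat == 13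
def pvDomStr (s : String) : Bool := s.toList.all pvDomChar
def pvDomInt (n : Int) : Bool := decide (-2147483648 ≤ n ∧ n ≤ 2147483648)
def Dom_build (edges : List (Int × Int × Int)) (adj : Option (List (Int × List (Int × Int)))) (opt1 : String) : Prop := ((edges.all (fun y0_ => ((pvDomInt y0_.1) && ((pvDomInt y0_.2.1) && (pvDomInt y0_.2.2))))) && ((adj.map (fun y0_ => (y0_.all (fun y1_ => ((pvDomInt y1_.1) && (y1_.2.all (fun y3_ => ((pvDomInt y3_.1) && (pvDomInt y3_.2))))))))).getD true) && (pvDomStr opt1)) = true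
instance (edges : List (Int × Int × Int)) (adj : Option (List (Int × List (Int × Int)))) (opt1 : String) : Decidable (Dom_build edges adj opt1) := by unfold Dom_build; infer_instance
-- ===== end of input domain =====

-- B replaces A's quadratic per-edge min-scan by one dict pass mapping (o,d) to the min weight
-- (objective: faster). Python A and B both mutate a caller-supplied `adj` in place the same way;
-- the theorems below are about the returned value.


-- ===== PORT A =====
-- A's `min(..., key=lambda x: x[2] if x[0]==r[0] and x[1]==r[1] else float('inf'))`:
-- the key value is an Int or +infinity; modelled exactly as Option Int (none = inf).
def keyA (r x : Int × Int × Int) : Option Int :=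
  if x.1 = r.1 ∧ x.2.1 = r.2.1 then some x.2.2 else none

-- strict `<` between an int key and float('inf') (exact: no NaN, ints only)
def ltInf : Option Int → Option Int → Bool
  | some a, some b => decide (a < b)
  | some _, none   => true
  | none,   _      => false

def undirected (t : List (Int × Int × Int)) : List (Int × Int × Int) :=
  t ++ t.map (fun r => (r.2.1, r.1, r.2.2))

-- Python's min(first :: rest, key=keyA r): keep the first element with minimal key
def pyMinKey (r first : Int × Int × Int) (rest : List (Int × Int × Int)) : Int × Int × Int :=
  rest.foldl (fun best x => if ltInf (keyA r x) (keyA r best) then x else best) first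

-- the `edges1 = [...]` comprehension (empty list ⇒ empty comprehension, min never called)
def edges1Of (es : List (Int × Int × Int)) : List (Int × Int × Int) :=
  match es with
  | [] => []
  | h :: t => (h :: t).map (fun r => (r.1, r.2.1, (pyMinKey r h t).2.2))

-- `if o not in adj: adj[o] = {}` then `adj[o][d] = p`
def insertAdj (adj : PySem.Dict Int (PySem.Dict Int Int)) (e : Int × Int × Int) :
    PySem.Dict Int (PySem.Dict Int Int) :=
  let adj1 := if adj.contains e.1 then adj else adj.insert e.1 PySem.Dict.empty
  adj1.insert e.1 ((adj1.getD e.1 PySem.Dict.empty).insert e.2.1 e.2.2)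

def adjOfList (adj : Option (List (Int × List (Int × Int)))) : PySem.Dict Int (PySem.Dict Int Int) :=
  match adj with
  | none => PySem.Dict.empty
  | some l => PySem.Dict.mk (l.map (fun kv => (kv.1, PySem.Dict.mk kv.2)))

def build (edges : List (Int × Int × Int)) (adj : Option (List (Int × List (Int × Int)))) (opt1 : String) : List (Int × List (Int × Int)) :=
  let edges1 := if opt1 = "dir" then edges1Of edges else edges1Of (undirected edges)
  let res := edges1.foldl insertAdj (adjOfList adj)
  res.items.map (fun kv => (kv.1, kv.2.items))

-- ===== PORT B =====
-- one pass: best[(o,d)] = min weight seen so far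
def minDictOf (es : List (Int × Int × Int)) : PySem.Dict (Int × Int) Int :=
  es.foldl (fun b x =>
    match b.get? (x.1, x.2.1) with
    | none => b.insert (x.1, x.2.1) x.2.2
    | some q => if x.2.2 < q then b.insert (x.1, x.2.1) x.2.2 else b) PySem.Dict.empty

def build_alt (edges : List (Int × Int × Int)) (adj : Option (List (Int × List (Int × Int)))) (opt1 : String) : List (Int × List (Int × Int)) :=
  let es := if opt1 = "dir" then edges else edges ++ edges.map (fun r => (r.2.1, r.1, r.2.2))
  let best := minDictOf es
  let res := es.foldl (fun a x =>
      let a1 := if a.contains x.1 then a else a.insert x.1 PySem.Dict.empty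
      a1.insert x.1 ((a1.getD x.1 PySem.Dict.empty).insert x.2.1 (best.getD (x.1, x.2.1) x.2.2)))
    (adjOfList adj)
  res.items.map (fun kv => (kv.1, kv.2.items))

-- ===== PRECONDITION & SPEC =====
def Spec_build (edges : List (Int × Int × Int)) (adj : Option (List (Int × List (Int × Int)))) (opt1 : String) (out : List (Int × List (Int × Int))) : Prop := out = build_alt edges adj opt1
instance (edges : List (Int × Int × Int)) (adj : Option (List (Int × List (Int × Int)))) (opt1 : String) (out : List (Int × List (Int × Int))) : Decidable (Spec_build edges adj opt1 out) := by unfold Spec_build; infer_instance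

-- ===== CLAIM (what is proved, stated in full; the proofs are below) =====
def Claim_equal_build : Prop := ∀ (edges : List (Int × Int × Int)) (adj : Option (List (Int × List (Int × Int)))) (opt1 : String), Dom_build edges adj opt1 → Spec_build edges adj opt1 (build edges adj opt1)

-- ===== LEMMAS AND PROOFS =====

-- key of x seen from the pair k = (o,d); `keyA r = keyK (r.1, r.2.1)` pointwise
def keyK (k : Int × Int) (x : Int × Int × Int) : Option Int :=
  if x.1 = k.1 ∧ x.2.1 = k.2 then some x.2.2 else none

-- binary "min with +inf = none", first-wins on ties (Python's min rule)
def min2 (a b : Option Int) : Option Int := if ltInf b a then b else a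

def minsK (k : Int × Int) (es : List (Int × Int × Int)) (acc : Option Int) : Option Int :=
  es.foldl (fun a x => min2 a (keyK k x)) acc

theorem keyA_eq_keyK (r x : Int × Int × Int) : keyA r x = keyK (r.1, r.2.1) x := rfl

theorem min2_none_left (b : Option Int) : min2 none b = b := by
  cases b <;> rfl

theorem min2_none_right (a : Option Int) : min2 a none = a := by
  cases a <;> rfl

theorem min2_isSome_left (q : Int) (b : Option Int) : (min2 (some q) b).isSome := by
  cases b with
  | none => rfl
  | some p => simp only [min2, ltInf]; split <;> rfl

theorem min2_some_right_isSome (a : Option Int) (p : Int) : (min2 a (some p)).isSome := by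
  cases a with
  | none => rfl
  | some q => simp only [min2, ltInf]; split <;> rfl

-- A's fold seen through the key function
theorem keyA_pyMinKey (r first : Int × Int × Int) (rest : List (Int × Int × Int)) :
    keyA r (pyMinKey r first rest) = minsK (r.1, r.2.1) rest (keyA r first) := by
  unfold pyMinKey minsK
  induction rest generalizing first with
  | nil => rfl
  | cons x xs ih =>
    simp only [List.foldl_cons]
    rw [ih]
    congr 1
    simp only [min2, keyA_eq_keyK]
    split <;> rfl

-- once the accumulator is some, it stays some
theorem minsK_isSome (k : Int × Int) (es : List (Int × Int × Int)) (q : Int) :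
    (minsK k es (some q)).isSome := by
  induction es generalizing q with
  | nil => rfl
  | cons x xs ih =>
    unfold minsK
    simp only [List.foldl_cons]
    have h := min2_isSome_left q (keyK k x)
    rcases Option.isSome_iff_exists.mp h with ⟨m, hm⟩
    rw [hm]
    exact ih m

-- a member whose key matches forces the total fold to be some
theorem minsK_isSome_of_mem (k : Int × Int) (r : Int × Int × Int)
    (hk : r.1 = k.1 ∧ r.2.1 = k.2) (es : List (Int × Int × Int)) (acc : Option Int)
    (hr : r ∈ es) : (minsK k es acc).isSome := by
  induction es generalizing acc with
  | nil => cases hr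
  | cons x xs ih =>
    unfold minsK
    simp only [List.foldl_cons]
    rcases List.mem_cons.mp hr with h | h
    · subst h
      have hkey : keyK k r = some r.2.2 := by simp [keyK, hk.1, hk.2]
      rw [hkey]
      rcases Option.isSome_iff_exists.mp (min2_some_right_isSome acc r.2.2) with ⟨m, hm⟩
      rw [hm]
      exact minsK_isSome k xs m
    · exact ih _ h

-- matching key means the element's weight IS the key value
theorem keyA_some_weight (r x : Int × Int × Int) (m : Int) (h : keyA r x = some m) :
    x.2.2 = m := by
  unfold keyA at h
  split at h
  · exact Option.some.inj h
  · cases h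

-- B's dict fold seen through get?
theorem get?_minFold (es : List (Int × Int × Int)) (b : PySem.Dict (Int × Int) Int)
    (k : Int × Int) :
    (es.foldl (fun b x =>
      match b.get? (x.1, x.2.1) with
      | none => b.insert (x.1, x.2.1) x.2.2
      | some q => if x.2.2 < q then b.insert (x.1, x.2.1) x.2.2 else b) b).get? k
    = minsK k es (b.get? k) := by
  induction es generalizing b with
  | nil => rfl
  | cons x xs ih =>
    unfold minsK
    simp only [List.foldl_cons]
    rw [ih]
    unfold minsK
    congr 1
    by_cases hk : (x.1, x.2.1) = k
    · have hkey : keyK k x = some x.2.2 := by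
        simp [keyK, ← hk]
      rw [hkey]
      cases hb : b.get? (x.1, x.2.1) with
      | none =>
        simp only [hk] at hb
        simp [hk, PySem.Dict.get?_insert_self, hb, min2, ltInf]
      | some q =>
        simp only [hk] at hb
        by_cases hlt : x.2.2 < q
        · simp [hlt, hk, PySem.Dict.get?_insert_self, hb, min2, ltInf]
        · simp [hlt, hb, min2, ltInf]
    · have hkey : keyK k x = none := by
        simp only [keyK]
        rw [if_neg]
        intro hc
        exact hk (by simp [hc.1, hc.2])
      rw [hkey, min2_none_right]
      have hne : k ≠ (x.1, x.2.1) := fun h => hk h.symm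
      cases hb : b.get? (x.1, x.2.1) with
      | none => rw [PySem.Dict.get?_insert_of_ne _ _ hne]
      | some q =>
        by_cases hlt : x.2.2 < q
        · simp only [if_pos hlt]; rw [PySem.Dict.get?_insert_of_ne _ _ hne]
        · simp only [if_neg hlt]

-- getD through get? (PySem.Dict.getD is defined as (get? _).getD)
theorem getD_eq_get?_getD (d : PySem.Dict (Int × Int) Int) (k : Int × Int) (dflt : Int) :
    d.getD k dflt = (d.get? k).getD dflt := rfl

-- the heart: per edge, A's min-scan weight = B's dict lookup
theorem minscan_eq_lookup (h : Int × Int × Int) (t : List (Int × Int × Int))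
    (r : Int × Int × Int) (hr : r ∈ h :: t) :
    (pyMinKey r h t).2.2 = (minDictOf (h :: t)).getD (r.1, r.2.1) r.2.2 := by
  set k : Int × Int := (r.1, r.2.1) with hkdef
  have hA : keyA r (pyMinKey r h t) = minsK k t (keyA r h) := keyA_pyMinKey r h t
  have hfold : minsK k (h :: t) none = minsK k t (keyA r h) := by
    unfold minsK
    simp only [List.foldl_cons]
    rw [min2_none_left, ← keyA_eq_keyK]
  have hsome : (minsK k (h :: t) (none : Option Int)).isSome :=
    minsK_isSome_of_mem k r ⟨rfl, rfl⟩ (h :: t) none hr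
  rcases Option.isSome_iff_exists.mp hsome with ⟨m, hm⟩
  have hAval : keyA r (pyMinKey r h t) = some m := by rw [hA, ← hfold, hm]
  have hw : (pyMinKey r h t).2.2 = m := keyA_some_weight _ _ _ hAval
  have hB : (minDictOf (h :: t)).get? k = some m := by
    unfold minDictOf
    rw [get?_minFold]
    show minsK k (h :: t) ((PySem.Dict.empty : PySem.Dict (Int × Int) Int).get? k) = some m
    rw [show (PySem.Dict.empty : PySem.Dict (Int × Int) Int).get? k = none from rfl, hm]
  rw [hw, getD_eq_get?_getD, hB]
  rfl

-- the general assembly, for any edge list es (the body of either branch)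
theorem branch_eq (es : List (Int × Int × Int)) (adj0 : PySem.Dict Int (PySem.Dict Int Int)) :
    (edges1Of es).foldl insertAdj adj0
    = es.foldl (fun a x =>
        let a1 := if a.contains x.1 then a else a.insert x.1 PySem.Dict.empty
        a1.insert x.1 ((a1.getD x.1 PySem.Dict.empty).insert x.2.1
          ((minDictOf es).getD (x.1, x.2.1) x.2.2))) adj0 := by
  cases es with
  | nil => rfl
  | cons h t =>
    unfold edges1Of
    rw [List.foldl_map]
    apply PySem.List.foldl_congr_mem
    intro acc x hx
    rw [minscan_eq_lookup h t x hx]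
    rfl

theorem build_eq_alt (edges : List (Int × Int × Int))
    (adj : Option (List (Int × List (Int × Int)))) (opt1 : String) :
    build edges adj opt1 = build_alt edges adj opt1 := by
  unfold build build_alt
  by_cases hopt : opt1 = "dir"
  · rw [if_pos hopt, if_pos hopt]
    exact congrArg (fun d => d.items.map (fun kv => (kv.1, kv.2.items)))
      (branch_eq edges (adjOfList adj))
  · rw [if_neg hopt, if_neg hopt]
    exact congrArg (fun d => d.items.map (fun kv => (kv.1, kv.2.items)))
      (branch_eq (undirected edges) (adjOfList adj))

-- ===== VERDICT (by name: the statement is the Claim_ definition above) =====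
theorem build_spec : Claim_equal_build := by
  intro edges adj opt1 _
  unfold Spec_build
  exact build_eq_alt edges adj opt1
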